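-- pv_equiv track=rewrite | github.com/caudellj/rosalind.info | rosalind.py | dp_non_crossing
-- ===== SOURCE A (Python) =====
-- def running_count_RNA(RNA):
--     count = {'A':0, 'U':0, 'C':0, 'G':0}
--     for char in RNA:
--         count[char] +=1
--     return count
--
-- complement = {'A':'U', 'U':'A', 'C':'G', 'G':'C'}
--
-- def dp_non_crossing(RNA):
--     partials = [len(RNA) * [0] for _ in RNA]
--     for i in range(len(RNA)-1):
--         if set([RNA[i], RNA[i+1]]) == {"A", "U"} or set([RNA[i], RNA[i+1]]) == {"C", "G"}:
--             partials[i][i+1] = 1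
--         partials[i+1][i] = 1
--     for k in range(3,len(RNA)):
--         for i in range(len(RNA)-k):
--             count = running_count_RNA(RNA[i:i+k+1])
--             if count['A'] == count['U'] and count['C'] == count['G']:
--                 for j in range(1,k):
--                     if complement[RNA[i]] == RNA[i+j]:
--                         partials[i][i+k] += partials[i+1][i+j-1]*partials[i+j+1][i+k]
--                 if complement[RNA[i]] == RNA[i+k]:
--                     partials[i][i+k] += partials[i+1][i+k-1]
--     return partials[0][-1]
-- ===== SOURCE B (Python) =====
-- complement = {'A': 'U', 'U': 'A', 'C': 'G', 'G': 'C'}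
--
-- def dp_non_crossing(RNA):
--     # Top-down memoized recursion on intervals [i, j) instead of A's bottom-up table.
--     memo = {}
--
--     def count(i, j):
--         if j <= i:
--             return 1
--         if (i, j) in memo:
--             return memo[(i, j)]
--         sub = RNA[i:j]
--         if sub.count('A') != sub.count('U') or sub.count('C') != sub.count('G'):
--             total = 0
--         else:
--             first = complement.get(RNA[i])
--             total = 0
--             for p in range(i + 1, j):
--                 if RNA[p] == first:
--                     total += count(i + 1, p) * count(p + 1, j)
--         memo[(i, j)] = total
--         return total
--
--     return count(0, len(RNA))
-- ===== Notes on version B (the rewrite author's own statement) =====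
-- stated objective: alternative
-- what changed: Replaces A's bottom-up O(n^2)-table DP (two nested index loops filling partials[i][i+k]) by a top-down memoized recursion on half-open intervals count(i,j) with the same balance-count short-circuit, so no table and no diagonal-order filling is needed.
import Mathlib
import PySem

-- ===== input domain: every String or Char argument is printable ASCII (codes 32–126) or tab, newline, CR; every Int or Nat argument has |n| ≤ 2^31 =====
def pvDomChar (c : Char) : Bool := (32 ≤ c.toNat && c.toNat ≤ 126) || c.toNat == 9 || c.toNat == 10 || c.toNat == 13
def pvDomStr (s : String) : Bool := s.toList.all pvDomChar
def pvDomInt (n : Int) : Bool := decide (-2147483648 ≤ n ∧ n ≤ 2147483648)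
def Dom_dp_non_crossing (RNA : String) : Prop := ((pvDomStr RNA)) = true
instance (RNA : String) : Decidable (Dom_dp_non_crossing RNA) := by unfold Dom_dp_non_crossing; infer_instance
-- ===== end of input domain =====

-- B replaces A's bottom-up interval-DP table by a top-down memoized recursion on intervals
-- (objective: alternative decomposition, same asymptotic cost).

-- ===== PORT A =====

-- module-level constant `complement` (both Pythons define this same dict)
def pvComplement : PySem.Dict Char Char :=
  PySem.Dict.ofList [('A', 'U'), ('U', 'A'), ('C', 'G'), ('G', 'C')]

-- RNA[i]; every use below keeps i in range, where this is exact
def pvCharAt (s : List Char) (i : Nat) : Char := s.getD i ' '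

-- `count[char] += 1` is Dict.modify where char is one of the four keys; on any other char
-- Python raises KeyError (such inputs of length ≥ 4, the only lengths that call this, are outside Pre_)
def running_count_RNA (RNA : List Char) : PySem.Dict Char Int :=
  RNA.foldl (fun d ch => d.modify ch 0 (· + 1))
    (PySem.Dict.ofList [('A', (0 : Int)), ('U', 0), ('C', 0), ('G', 0)])

-- partials[i][j] read / write (indices at the uses below are always in range)
def pvGet2 (T : List (List Int)) (i j : Nat) : Int := (T.getD i []).getD j 0
def pvSet2 (T : List (List Int)) (i j : Nat) (v : Int) : List (List Int) :=
  T.set i ((T.getD i []).set j v)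

-- set([RNA[i], RNA[i+1]]) == {"A","U"} or set([RNA[i], RNA[i+1]]) == {"C","G"}
def pvPairCond (x y : Char) : Bool :=
  PySem.Set.equal (PySem.Set.ofList [x, y]) (PySem.Set.ofList ['A', 'U']) ||
  PySem.Set.equal (PySem.Set.ofList [x, y]) (PySem.Set.ofList ['C', 'G'])

-- body of the first loop (for i in range(len(RNA)-1))
def pvStep1 (s : List Char) (T : List (List Int)) (i : Nat) : List (List Int) :=
  let T1 := if pvPairCond (pvCharAt s i) (pvCharAt s (i + 1)) then pvSet2 T i (i + 1) 1 else T
  pvSet2 T1 (i + 1) i 1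

def pvLoop1 (s : List Char) : List (List Int) :=
  (List.range (s.length - 1)).foldl (pvStep1 s) (s.map (fun _ => List.replicate s.length 0))

-- body of the k-loop for one i; `complement[RNA[i]] == RNA[i+j]` is get? == some …,
-- exact where RNA[i] is a key (Python raises KeyError otherwise, outside Pre_)
def pvBody (s : List Char) (k : Nat) (T : List (List Int)) (i : Nat) : List (List Int) :=
  let count := running_count_RNA ((s.drop i).take (k + 1))   -- RNA[i:i+k+1]
  if count.getD 'A' 0 == count.getD 'U' 0 && count.getD 'C' 0 == count.getD 'G' 0 then
    let T1 := (List.range' 1 (k - 1)).foldl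
      (fun T j =>
        if pvComplement.get? (pvCharAt s i) == some (pvCharAt s (i + j)) then
          pvSet2 T i (i + k)
            (pvGet2 T i (i + k) + pvGet2 T (i + 1) (i + j - 1) * pvGet2 T (i + j + 1) (i + k))
        else T) T
    if pvComplement.get? (pvCharAt s i) == some (pvCharAt s (i + k)) then
      pvSet2 T1 i (i + k) (pvGet2 T1 i (i + k) + pvGet2 T1 (i + 1) (i + k - 1))
    else T1
  else T

-- for k in range(3, len(RNA)): for i in range(len(RNA)-k): …
def pvLoop2 (s : List Char) (T : List (List Int)) : List (List Int) :=
  (List.range' 3 (s.length - 3)).foldl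
    (fun T k => (List.range (s.length - k)).foldl (pvBody s k) T) T

-- return partials[0][-1]; both Python subscripts raise only on the empty string (excluded by Pre_)
def dp_non_crossing (RNA : String) : Int :=
  let s := RNA.toList
  let T := pvLoop2 s (pvLoop1 s)
  (PySem.List.pyGet? (T.getD 0 []) (-1)).getD 0

-- ===== PORT B =====

-- count(i, j) of Source B, structurally recursive on the fuel argument (the call below supplies
-- fuel ≥ j - i, so the 0-arm is never reached by a real call).
-- Source B's memo dict is only an evaluation cache: the returned values are those of the plain recursion.
-- str.count with a one-character needle counts occurrences of that character: List.count is exact.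
def pvCount (s : List Char) : Nat → Nat → Nat → Int
  | 0, _, _ => 1
  | fuel + 1, i, j =>
    if j ≤ i then 1
    else
      let sub := (s.drop i).take (j - i)        -- RNA[i:j]
      if sub.count 'A' != sub.count 'U' || sub.count 'C' != sub.count 'G' then 0
      else
        let first := pvComplement.get? (pvCharAt s i)   -- complement.get(RNA[i])
        (List.range' (i + 1) (j - (i + 1))).foldl
          (fun total p =>
            if some (pvCharAt s p) == first then
              total + pvCount s fuel (i + 1) p * pvCount s fuel (p + 1) j
            else total) 0

def dp_non_crossing_alt (RNA : String) : Int :=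
  pvCount RNA.toList RNA.toList.length 0 RNA.toList.length

-- ===== PRECONDITION & SPEC =====

-- Pre_ excludes exactly the inputs on which Python A raises: the empty string (IndexError on
-- partials[0]) and strings of length ≥ 4 containing a character outside 'AUCG' (KeyError in
-- running_count_RNA / complement lookup, reached because every position lies in some length-4 window).
def Pre_dp_non_crossing (RNA : String) : Prop :=
  RNA.toList ≠ [] ∧
    (4 ≤ RNA.toList.length → ∀ c ∈ RNA.toList, c ∈ (['A', 'U', 'C', 'G'] : List Char))
instance (RNA : String) : Decidable (Pre_dp_non_crossing RNA) := by
  unfold Pre_dp_non_crossing; infer_instance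

def pvWitness_dp_non_crossing : String := "AU"

def Spec_dp_non_crossing (RNA : String) (out : Int) : Prop := out = dp_non_crossing_alt RNA
instance (RNA : String) (out : Int) : Decidable (Spec_dp_non_crossing RNA out) := by
  unfold Spec_dp_non_crossing; infer_instance

-- ===== CLAIM (what is proved, stated in full; the proofs are below) =====
def Claim_equal_dp_non_crossing : Prop :=
  ∀ (RNA : String), Dom_dp_non_crossing RNA → Pre_dp_non_crossing RNA →
    Spec_dp_non_crossing RNA (dp_non_crossing RNA)

-- ===== LEMMAS AND PROOFS =====

set_option maxHeartbeats 1000000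

lemma pvCount_zero (s : List Char) (i j : Nat) : pvCount s 0 i j = 1 := rfl

lemma pvCount_succ (s : List Char) (f i j : Nat) :
    pvCount s (f + 1) i j =
      if j ≤ i then 1
      else
        if ((s.drop i).take (j - i)).count 'A' != ((s.drop i).take (j - i)).count 'U'
            || ((s.drop i).take (j - i)).count 'C' != ((s.drop i).take (j - i)).count 'G' then 0
        else
          (List.range' (i + 1) (j - (i + 1))).foldl
            (fun total p =>
              if some (pvCharAt s p) == pvComplement.get? (pvCharAt s i) then
                total + pvCount s f (i + 1) p * pvCount s f (p + 1) j
              else total) 0 := rfl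

-- B's count of the interval [i, j), at its canonical fuel
def pvC (s : List Char) (i j : Nat) : Int := pvCount s (j - i) i j

-- the fuel is irrelevant as long as it covers the interval length
lemma pvCount_irrel (s : List Char) :
    ∀ f g i j, j - i ≤ f → j - i ≤ g → pvCount s f i j = pvCount s g i j := by
  intro f
  induction f using Nat.strong_induction_on with
  | _ f ih =>
    intro g i j hf hg
    by_cases hji : j ≤ i
    · cases f <;> cases g <;> simp [pvCount_zero, pvCount_succ, hji]
    · obtain ⟨f', rfl⟩ : ∃ f', f = f' + 1 := ⟨f - 1, by omega⟩
      obtain ⟨g', rfl⟩ : ∃ g', g = g' + 1 := ⟨g - 1, by omega⟩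
      rw [pvCount_succ, pvCount_succ, if_neg hji, if_neg hji]
      split_ifs with hb
      · rfl
      · apply PySem.List.foldl_congr_mem
        intro acc p hp
        have hp' := List.mem_range'_1.mp hp
        by_cases hm : (some (pvCharAt s p) == pvComplement.get? (pvCharAt s i)) = true
        · rw [if_pos hm, if_pos hm,
              ih f' (by omega) g' (i + 1) p (by omega) (by omega),
              ih f' (by omega) g' (p + 1) j (by omega) (by omega)]
        · rw [if_neg hm, if_neg hm]

lemma pvCount_eq_pvC (s : List Char) (f i j : Nat) (h : j - i ≤ f) :
    pvCount s f i j = pvC s i j :=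
  pvCount_irrel s f (j - i) i j h le_rfl

lemma pvC_nil (s : List Char) (i j : Nat) (h : j ≤ i) : pvC s i j = 1 := by
  unfold pvC; rw [Nat.sub_eq_zero_of_le h]; exact pvCount_zero s i j

lemma pvC_one (s : List Char) (i : Nat) : pvC s i (i + 1) = 0 := by
  unfold pvC
  rw [show i + 1 - i = 0 + 1 from by omega, pvCount_succ, if_neg (by omega),
      show i + 1 - (i + 1) = 0 from by omega]
  simp

lemma pvC_three (s : List Char) (i : Nat) : pvC s i (i + 3) = 0 := by
  unfold pvC
  rw [show i + 3 - i = 2 + 1 from by omega, pvCount_succ, if_neg (by omega),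
      show i + 3 - (i + 1) = 2 from by omega,
      show List.range' (i + 1) 2 = [i + 1, i + 2] from by simp [List.range'_succ]]
  have hone : ∀ x, pvCount s 2 x x = 1 := fun x => by
    rw [pvCount_eq_pvC s 2 x x (by omega)]; exact pvC_nil s x x le_rfl
  have ha : pvCount s 2 (i + 1) (i + 2) = 0 := by
    rw [pvCount_eq_pvC s 2 (i + 1) (i + 2) (by omega)]; exact pvC_one s (i + 1)
  have hb : pvCount s 2 (i + 2) (i + 3) = 0 := by
    rw [pvCount_eq_pvC s 2 (i + 2) (i + 3) (by omega)]; exact pvC_one s (i + 2)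
  simp only [List.foldl_cons, List.foldl_nil]
  split_ifs <;> simp [ha, hb, hone]

-- complement.get on an arbitrary key
lemma pvComplement_get? (x : Char) :
    pvComplement.get? x =
      if x = 'A' then some 'U' else if x = 'U' then some 'A'
      else if x = 'C' then some 'G' else if x = 'G' then some 'C' else none := by
  by_cases h1 : x = 'A'
  · subst h1; rfl
  · by_cases h2 : x = 'U'
    · subst h2; rfl
    · by_cases h3 : x = 'C'
      · subst h3; rfl
      · by_cases h4 : x = 'G'
        · subst h4; rfl
        · rw [if_neg h1, if_neg h2, if_neg h3, if_neg h4]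
          rw [show pvComplement = PySem.Dict.mk
                [('A', 'U'), ('U', 'A'), ('C', 'G'), ('G', 'C')] from rfl]
          rw [PySem.Dict.get?_mk_cons, PySem.Dict.get?_mk_cons,
              PySem.Dict.get?_mk_cons, PySem.Dict.get?_mk_cons]
          simp [beq_iff_eq, Ne.symm h1, Ne.symm h2, Ne.symm h3, Ne.symm h4,
                PySem.Dict.get?]

-- A's two-element set test is exactly "y is the complement of x"
lemma pvPairCond_iff (x y : Char) :
    pvPairCond x y = true ↔ pvComplement.get? x = some y := by
  rw [pvComplement_get?]
  simp only [pvPairCond, Bool.or_eq_true, PySem.Set.equal_iff]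
  constructor
  · rintro (h | h)
    · have hx := (h x).mp (by simp [PySem.Set.mem_ofList])
      have hU := (h 'U').mpr (by simp [PySem.Set.mem_ofList])
      simp only [PySem.Set.mem_ofList, List.mem_cons, List.not_mem_nil, or_false] at hx hU
      rcases hx with rfl | rfl
      · rcases hU with h' | h'
        · exact absurd h'.symm (by decide)
        · simp [← h']
      · have hA := (h 'A').mpr (by simp [PySem.Set.mem_ofList])
        simp only [PySem.Set.mem_ofList, List.mem_cons, List.not_mem_nil, or_false] at hA
        rcases hA with h'' | h''
        · exact absurd h''.symm (by decide)
        · simp [← h'']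
    · have hx := (h x).mp (by simp [PySem.Set.mem_ofList])
      have hG := (h 'G').mpr (by simp [PySem.Set.mem_ofList])
      simp only [PySem.Set.mem_ofList, List.mem_cons, List.not_mem_nil, or_false] at hx hG
      rcases hx with rfl | rfl
      · rcases hG with h' | h'
        · exact absurd h'.symm (by decide)
        · simp [← h']
      · have hC := (h 'C').mpr (by simp [PySem.Set.mem_ofList])
        simp only [PySem.Set.mem_ofList, List.mem_cons, List.not_mem_nil, or_false] at hC
        rcases hC with h'' | h''
        · exact absurd h''.symm (by decide)
        · simp [← h'']
  · intro h
    by_cases h1 : x = 'A'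
    · subst h1; rw [if_pos rfl] at h
      obtain rfl : y = 'U' := by simpa using h.symm
      left; intro z; exact Iff.rfl
    · by_cases h2 : x = 'U'
      · subst h2; rw [if_neg h1, if_pos rfl] at h
        obtain rfl : y = 'A' := by simpa using h.symm
        left; intro z
        simp only [PySem.Set.mem_ofList, List.mem_cons, List.not_mem_nil, or_false]
        tauto
      · by_cases h3 : x = 'C'
        · subst h3; rw [if_neg h1, if_neg h2, if_pos rfl] at h
          obtain rfl : y = 'G' := by simpa using h.symm
          right; intro z; exact Iff.rfl
        · by_cases h4 : x = 'G'
          · subst h4; rw [if_neg h1, if_neg h2, if_neg h3, if_pos rfl] at h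
            obtain rfl : y = 'C' := by simpa using h.symm
            right; intro z
            simp only [PySem.Set.mem_ofList, List.mem_cons, List.not_mem_nil, or_false]
            tauto
          · rw [if_neg h1, if_neg h2, if_neg h3, if_neg h4] at h
            exact absurd h (by simp)

-- a complementary pair of characters is balanced
lemma pvPair_balanced (x y : Char) (hm : pvComplement.get? x = some y) :
    ([x, y].count 'A' != [x, y].count 'U' || [x, y].count 'C' != [x, y].count 'G') = false := by
  rw [pvComplement_get?] at hm
  by_cases h1 : x = 'A'
  · rw [if_pos h1] at hm
    obtain rfl : y = 'U' := by simpa using hm.symm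
    subst h1; decide
  · rw [if_neg h1] at hm
    by_cases h2 : x = 'U'
    · rw [if_pos h2] at hm
      obtain rfl : y = 'A' := by simpa using hm.symm
      subst h2; decide
    · rw [if_neg h2] at hm
      by_cases h3 : x = 'C'
      · rw [if_pos h3] at hm
        obtain rfl : y = 'G' := by simpa using hm.symm
        subst h3; decide
      · rw [if_neg h3] at hm
        by_cases h4 : x = 'G'
        · rw [if_pos h4] at hm
          obtain rfl : y = 'C' := by simpa using hm.symm
          subst h4; decide
        · rw [if_neg h4] at hm
          exact absurd hm (by simp)

-- B's length-2 interval value, the two characters being in range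
lemma pvC_two (s : List Char) (i : Nat) (h : i + 1 < s.length) :
    pvC s i (i + 2) =
      if pvComplement.get? (pvCharAt s i) = some (pvCharAt s (i + 1)) then 1 else 0 := by
  have hi : i < s.length := by omega
  have e1 : pvCharAt s i = s[i] := by
    simp [pvCharAt, List.getD_eq_getElem?_getD, List.getElem?_eq_getElem hi]
  have e2 : pvCharAt s (i + 1) = s[i + 1] := by
    simp [pvCharAt, List.getD_eq_getElem?_getD, List.getElem?_eq_getElem h]
  have hsub : (s.drop i).take (i + 2 - i) = [pvCharAt s i, pvCharAt s (i + 1)] := by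
    rw [show i + 2 - i = 0 + 1 + 1 from by omega, List.drop_eq_getElem_cons hi,
        List.drop_eq_getElem_cons h, List.take_succ_cons, List.take_succ_cons,
        List.take_zero, e1, e2]
  have hone : ∀ x y, y ≤ x → pvCount s 1 x y = 1 := fun x y hxy => by
    rw [pvCount_eq_pvC s 1 x y (by omega)]; exact pvC_nil s x y hxy
  unfold pvC
  rw [show i + 2 - i = 1 + 1 from by omega, pvCount_succ, if_neg (by omega)]
  rw [hsub, show i + 2 - (i + 1) = 1 from by omega,
      show List.range' (i + 1) 1 = [i + 1] from by simp [List.range'_succ]]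
  simp only [List.foldl_cons, List.foldl_nil]
  rw [hone (i + 1) (i + 1) le_rfl, hone (i + 2) (i + 2) le_rfl]
  by_cases hm : pvComplement.get? (pvCharAt s i) = some (pvCharAt s (i + 1))
  · rw [if_pos hm, pvPair_balanced _ _ hm]
    rw [if_neg (by simp)]
    rw [if_pos (beq_iff_eq.mpr hm.symm)]
    norm_num
  · rw [if_neg hm]
    split_ifs with hb hc
    · rfl
    · exact absurd (beq_iff_eq.mp hc).symm hm
    · rfl

-- table cell lemmas --------------------------------------------------------

lemma pvSet2_length (T : List (List Int)) (i j : Nat) (v : Int) :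
    (pvSet2 T i j v).length = T.length := by
  simp [pvSet2]

lemma pvRowLen {n : Nat} (T : List (List Int)) (i : Nat)
    (hlen : T.length = n) (hrows : ∀ r ∈ T, r.length = n) (hi : i < n) :
    (T.getD i []).length = n := by
  have hi' : i < T.length := by omega
  rw [List.getD_eq_getElem?_getD, List.getElem?_eq_getElem hi']
  exact hrows _ (List.getElem_mem hi')

lemma pvSet2_rows {n : Nat} (T : List (List Int)) (i j : Nat) (v : Int)
    (hlen : T.length = n) (hrows : ∀ r ∈ T, r.length = n) (hi : i < n) :
    ∀ r ∈ pvSet2 T i j v, r.length = n := by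
  intro r hr
  rcases List.mem_or_eq_of_mem_set hr with h | h
  · exact hrows r h
  · subst h
    rw [List.length_set]
    exact pvRowLen T i hlen hrows hi

lemma pvGet2_set2_ne (T : List (List Int)) {i j r c : Nat} (v : Int)
    (h : r ≠ i ∨ c ≠ j) : pvGet2 (pvSet2 T i j v) r c = pvGet2 T r c := by
  simp only [pvGet2, pvSet2, List.getD_eq_getElem?_getD]
  rcases h with h | h
  · rw [List.getElem?_set_ne (by omega)]
  · by_cases hri : r = i
    · subst hri
      by_cases hlt : r < T.length
      · rw [List.getElem?_set_self (by omega)]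
        simp only [Option.getD_some]
        rw [List.getElem?_set_ne (by omega)]
      · rw [List.set_eq_of_length_le (by omega)]
    · rw [List.getElem?_set_ne (by omega)]

lemma pvGet2_set2_self (T : List (List Int)) {i j : Nat} (v : Int)
    (hi : i < T.length) (hj : j < (T.getD i []).length) :
    pvGet2 (pvSet2 T i j v) i j = v := by
  simp only [List.getD_eq_getElem?_getD] at hj
  simp only [pvGet2, pvSet2, List.getD_eq_getElem?_getD]
  rw [List.getElem?_set_self (by omega)]
  simp only [Option.getD_some]
  rw [List.getElem?_set_self (by omega)]
  rfl

-- a fold that conditionally accumulates is the sum of its kept terms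
lemma pv_foldl_if_sum (L : List Nat) (c : Nat → Bool) (g : Nat → Int) (a : Int) :
    L.foldl (fun t p => if c p then t + g p else t) a
      = a + (L.map (fun p => if c p then g p else 0)).sum := by
  induction L generalizing a with
  | nil => simp
  | cons p L ih =>
    simp only [List.foldl_cons, List.map_cons, List.sum_cons]
    by_cases h : c p
    · rw [if_pos h, if_pos h, ih, add_assoc]
    · rw [if_neg h, if_neg h, ih, zero_add]

-- invariant: band of computed intervals -------------------------------------

def pvInv (s : List Char) (K : Nat) (T : List (List Int)) : Prop :=
  T.length = s.length ∧ (∀ r ∈ T, r.length = s.length) ∧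
    ∀ i j, i < s.length → j < s.length →
      pvGet2 T i j = if i ≤ j + 1 ∧ j ≤ i + K then pvC s i (j + 1) else 0

-- during iteration k of the outer loop, rows below m are already extended to distance k
def pvInv2 (s : List Char) (k m : Nat) (T : List (List Int)) : Prop :=
  T.length = s.length ∧ (∀ r ∈ T, r.length = s.length) ∧
    ∀ i j, i < s.length → j < s.length →
      pvGet2 T i j =
        if (i ≤ j + 1 ∧ j ≤ i + (k - 1)) ∨ (j = i + k ∧ i < m) then pvC s i (j + 1) else 0

lemma pvLoop1_aux (s : List Char) (m : Nat) (hm : m ≤ s.length - 1) :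
    (((List.range m).foldl (pvStep1 s) (s.map (fun _ => List.replicate s.length 0))).length
        = s.length) ∧
    (∀ r ∈ (List.range m).foldl (pvStep1 s) (s.map (fun _ => List.replicate s.length 0)),
        r.length = s.length) ∧
    ∀ i j, i < s.length → j < s.length →
      pvGet2 ((List.range m).foldl (pvStep1 s) (s.map (fun _ => List.replicate s.length 0))) i j
        = if j + 1 = i ∧ i ≤ m then 1
          else if j = i + 1 ∧ i < m then
            (if pvPairCond (pvCharAt s i) (pvCharAt s (i + 1)) then 1 else 0)
          else 0 := by
  induction m with
  | zero =>
    simp only [List.range_zero, List.foldl_nil]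
    refine ⟨by simp, ?_, ?_⟩
    · intro r hr
      obtain ⟨a, -, rfl⟩ := List.mem_map.mp hr
      simp
    · intro i j hi hj
      have hz : pvGet2 (s.map (fun _ => List.replicate s.length 0)) i j = 0 := by
        simp only [pvGet2, List.getD_eq_getElem?_getD, List.getElem?_map,
                   List.getElem?_eq_getElem hi]
        simp
      rw [hz, if_neg (by omega), if_neg (by omega)]
  | succ m ih =>
    obtain ⟨hlen, hrows, hcell⟩ := ih (by omega)
    set T := (List.range m).foldl (pvStep1 s) (s.map (fun _ => List.replicate s.length 0))
      with hT
    have hm1 : m + 1 < s.length := by omega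
    have hm0 : m < s.length := by omega
    rw [List.range_succ, List.foldl_append, List.foldl_cons, List.foldl_nil]
    simp only [pvStep1]
    set T1 := if pvPairCond (pvCharAt s m) (pvCharAt s (m + 1)) then pvSet2 T m (m + 1) 1 else T
      with hT1
    have hT1len : T1.length = s.length := by
      rw [hT1]; split_ifs <;> simp [pvSet2_length, hlen]
    have hT1rows : ∀ r ∈ T1, r.length = s.length := by
      rw [hT1]; split_ifs
      · exact pvSet2_rows T m (m + 1) 1 hlen hrows hm0
      · exact hrows
    have hT1cell : ∀ i j, i < s.length → j < s.length →
        pvGet2 T1 i j = if i = m ∧ j = m + 1 then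
            (if pvPairCond (pvCharAt s m) (pvCharAt s (m + 1)) then 1 else 0)
          else pvGet2 T i j := by
      intro i j hi hj
      by_cases hij : i = m ∧ j = m + 1
      · rw [hij.1, hij.2, if_pos ⟨rfl, rfl⟩, hT1]
        by_cases hc : pvPairCond (pvCharAt s m) (pvCharAt s (m + 1)) = true
        · rw [if_pos hc, if_pos hc,
              pvGet2_set2_self T (i := m) (j := m + 1) 1
                (by rw [hlen]; omega) (by rw [pvRowLen T m hlen hrows hm0]; omega)]
        · rw [if_neg hc, if_neg hc, hcell m (m + 1) hm0 hm1,
              if_neg (show ¬(m + 1 + 1 = m ∧ m ≤ m) by omega),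
              if_neg (show ¬(m + 1 = m + 1 ∧ m < m) by omega)]
      · rw [if_neg hij, hT1]
        by_cases hc : pvPairCond (pvCharAt s m) (pvCharAt s (m + 1)) = true
        · rw [if_pos hc]
          exact pvGet2_set2_ne T 1 (show i ≠ m ∨ j ≠ m + 1 by tauto)
        · rw [if_neg hc]
    refine ⟨by rw [pvSet2_length]; exact hT1len,
           pvSet2_rows T1 (m + 1) m 1 hT1len hT1rows hm1, ?_⟩
    intro i j hi hj
    by_cases hij : i = m + 1 ∧ j = m
    · rw [hij.1, hij.2,
          pvGet2_set2_self T1 (i := m + 1) (j := m) 1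
            (by rw [hT1len]; omega)
            (by rw [pvRowLen T1 (m + 1) hT1len hT1rows hm1]; omega),
          if_pos (show m + 1 = m + 1 ∧ m + 1 ≤ m + 1 by omega)]
    · rw [pvGet2_set2_ne T1 1 (show i ≠ m + 1 ∨ j ≠ m by tauto), hT1cell i j hi hj]
      by_cases hij2 : i = m ∧ j = m + 1
      · rw [hij2.1, hij2.2, if_pos ⟨rfl, rfl⟩,
            if_neg (show ¬(m + 1 + 1 = m ∧ m ≤ m + 1) by omega),
            if_pos (show m + 1 = m + 1 ∧ m < m + 1 by omega)]
      · rw [if_neg hij2, hcell i j hi hj]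
        by_cases c1 : j + 1 = i ∧ i ≤ m
        · rw [if_pos c1, if_pos (show j + 1 = i ∧ i ≤ m + 1 by omega)]
        · rw [if_neg c1]
          by_cases c2 : j = i + 1 ∧ i < m
          · rw [if_pos c2, if_neg (show ¬(j + 1 = i ∧ i ≤ m + 1) by omega),
                if_pos (show j = i + 1 ∧ i < m + 1 by omega)]
          · rw [if_neg c2, if_neg (show ¬(j + 1 = i ∧ i ≤ m + 1) by omega),
                if_neg (show ¬(j = i + 1 ∧ i < m + 1) by omega)]

lemma pvLoop1_inv (s : List Char) : pvInv s 1 (pvLoop1 s) := by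
  unfold pvLoop1
  obtain ⟨hlen, hrows, hcell⟩ := pvLoop1_aux s (s.length - 1) le_rfl
  refine ⟨hlen, hrows, ?_⟩
  intro i j hi hj
  rw [hcell i j hi hj]
  by_cases c1 : j + 1 = i
  · rw [if_pos (show j + 1 = i ∧ i ≤ s.length - 1 from ⟨c1, by omega⟩),
        if_pos (show i ≤ j + 1 ∧ j ≤ i + 1 by omega),
        pvC_nil s i (j + 1) (by omega)]
  · rw [if_neg (show ¬(j + 1 = i ∧ i ≤ s.length - 1) by omega)]
    by_cases c2 : j = i + 1
    · rw [if_pos (show j = i + 1 ∧ i < s.length - 1 from ⟨c2, by omega⟩),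
          if_pos (show i ≤ j + 1 ∧ j ≤ i + 1 by omega)]
      subst c2
      rw [pvC_two s i (by omega)]
      by_cases hmc : pvComplement.get? (pvCharAt s i) = some (pvCharAt s (i + 1))
      · rw [if_pos ((pvPairCond_iff _ _).mpr hmc), if_pos hmc]
      · rw [if_neg (fun hb => hmc ((pvPairCond_iff _ _).mp hb)), if_neg hmc]
    · rw [if_neg (show ¬(j = i + 1 ∧ i < s.length - 1) by omega)]
      by_cases c3 : i = j
      · rw [if_pos (show i ≤ j + 1 ∧ j ≤ i + 1 by omega), c3, pvC_one s j]
      · rw [if_neg (show ¬(i ≤ j + 1 ∧ j ≤ i + 1) by omega)]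

lemma pvInv_widen (s : List Char) (T : List (List Int)) (h : pvInv s 1 T) : pvInv s 2 T := by
  obtain ⟨h1, h2, h3⟩ := h
  refine ⟨h1, h2, ?_⟩
  intro i j hi hj
  rw [h3 i j hi hj]
  by_cases c1 : i ≤ j + 1 ∧ j ≤ i + 1
  · rw [if_pos c1, if_pos (show i ≤ j + 1 ∧ j ≤ i + 2 by omega)]
  · rw [if_neg c1]
    by_cases c2 : i ≤ j + 1 ∧ j ≤ i + 2
    · rw [if_pos c2]
      have : j = i + 2 := by omega
      subst this
      exact (pvC_three s i).symm
    · rw [if_neg c2]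

-- value of B's count on an interval of length k+1, unfolded once
lemma pvC_unfold (s : List Char) (i k : Nat) :
    pvC s i (i + k + 1) =
      (if ((s.drop i).take (k + 1)).count 'A' != ((s.drop i).take (k + 1)).count 'U'
          || ((s.drop i).take (k + 1)).count 'C' != ((s.drop i).take (k + 1)).count 'G' then 0
       else (List.range' (i + 1) k).foldl
          (fun total p =>
            if some (pvCharAt s p) == pvComplement.get? (pvCharAt s i) then
              total + pvC s (i + 1) p * pvC s (p + 1) (i + k + 1)
            else total) 0) := by
  have hL : pvC s i (i + k + 1) = pvCount s (k + 1) i (i + k + 1) := by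
    unfold pvC
    rw [show i + k + 1 - i = k + 1 from by omega]
  rw [hL, pvCount_succ, if_neg (by omega),
      show i + k + 1 - i = k + 1 from by omega,
      show i + k + 1 - (i + 1) = k from by omega]
  split_ifs with hbb
  · rfl
  · apply PySem.List.foldl_congr_mem
    intro acc p hp
    have hp' := List.mem_range'_1.mp hp
    by_cases hm : (some (pvCharAt s p) == pvComplement.get? (pvCharAt s i)) = true
    · rw [if_pos hm, if_pos hm,
          pvCount_eq_pvC s k (i + 1) p (by omega),
          pvCount_eq_pvC s k (p + 1) (i + k + 1) (by omega)]
    · rw [if_neg hm, if_neg hm]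

-- cumulative effect of the inner j-loop of pvBody on each cell
lemma pvInner_cells (s : List Char) (k i n : Nat) :
    ∀ (L : List Nat) (T : List (List Int)), T.length = n → (∀ r ∈ T, r.length = n) →
      i < n → i + k < n →
      (L.foldl (fun T j =>
          if pvComplement.get? (pvCharAt s i) == some (pvCharAt s (i + j)) then
            pvSet2 T i (i + k)
              (pvGet2 T i (i + k) + pvGet2 T (i + 1) (i + j - 1) * pvGet2 T (i + j + 1) (i + k))
          else T) T).length = n ∧
      (∀ r ∈ L.foldl (fun T j =>
          if pvComplement.get? (pvCharAt s i) == some (pvCharAt s (i + j)) then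
            pvSet2 T i (i + k)
              (pvGet2 T i (i + k) + pvGet2 T (i + 1) (i + j - 1) * pvGet2 T (i + j + 1) (i + k))
          else T) T, r.length = n) ∧
      (∀ r c, r ≠ i → pvGet2 (L.foldl (fun T j =>
          if pvComplement.get? (pvCharAt s i) == some (pvCharAt s (i + j)) then
            pvSet2 T i (i + k)
              (pvGet2 T i (i + k) + pvGet2 T (i + 1) (i + j - 1) * pvGet2 T (i + j + 1) (i + k))
          else T) T) r c = pvGet2 T r c) ∧
      pvGet2 (L.foldl (fun T j =>
          if pvComplement.get? (pvCharAt s i) == some (pvCharAt s (i + j)) then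
            pvSet2 T i (i + k)
              (pvGet2 T i (i + k) + pvGet2 T (i + 1) (i + j - 1) * pvGet2 T (i + j + 1) (i + k))
          else T) T) i (i + k)
        = pvGet2 T i (i + k) +
          (L.map (fun j =>
            if pvComplement.get? (pvCharAt s i) == some (pvCharAt s (i + j)) then
              pvGet2 T (i + 1) (i + j - 1) * pvGet2 T (i + j + 1) (i + k) else 0)).sum := by
  intro L
  induction L with
  | nil =>
    intro T hlen hrows hi hik
    exact ⟨hlen, hrows, fun _ _ _ => rfl, by simp⟩
  | cons j L ih =>
    intro T hlen hrows hi hik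
    simp only [List.foldl_cons, List.map_cons, List.sum_cons]
    by_cases hc : (pvComplement.get? (pvCharAt s i) == some (pvCharAt s (i + j))) = true
    · rw [if_pos hc, if_pos hc]
      set T' := pvSet2 T i (i + k)
        (pvGet2 T i (i + k) + pvGet2 T (i + 1) (i + j - 1) * pvGet2 T (i + j + 1) (i + k))
        with hT'
      have hlen' : T'.length = n := by rw [hT', pvSet2_length]; exact hlen
      have hrows' : ∀ r ∈ T', r.length = n := pvSet2_rows T i (i + k) _ hlen hrows hi
      obtain ⟨ih1, ih2, ih3, ih4⟩ := ih T' hlen' hrows' hi hik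
      refine ⟨ih1, ih2, ?_, ?_⟩
      · intro r c hr
        rw [ih3 r c hr, hT', pvGet2_set2_ne T _ (Or.inl hr)]
      · rw [ih4]
        have hself : pvGet2 T' i (i + k)
            = pvGet2 T i (i + k)
              + pvGet2 T (i + 1) (i + j - 1) * pvGet2 T (i + j + 1) (i + k) := by
          rw [hT']
          exact pvGet2_set2_self T _ (by omega) (by rw [pvRowLen T i hlen hrows hi]; omega)
        have hmap : (L.map (fun j' =>
            if pvComplement.get? (pvCharAt s i) == some (pvCharAt s (i + j')) then
              pvGet2 T' (i + 1) (i + j' - 1) * pvGet2 T' (i + j' + 1) (i + k) else 0))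
            = (L.map (fun j' =>
            if pvComplement.get? (pvCharAt s i) == some (pvCharAt s (i + j')) then
              pvGet2 T (i + 1) (i + j' - 1) * pvGet2 T (i + j' + 1) (i + k) else 0)) := by
          apply List.map_congr_left
          intro j' _
          rw [hT', pvGet2_set2_ne T _ (Or.inl (by omega)),
              pvGet2_set2_ne T _ (Or.inl (by omega))]
        rw [hmap, hself]
        ring
    · rw [if_neg hc, if_neg hc]
      obtain ⟨ih1, ih2, ih3, ih4⟩ := ih T hlen hrows hi hik
      exact ⟨ih1, ih2, ih3, by rw [ih4, zero_add]⟩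

-- the inner j-loop never touches a column other than i + k in row i
lemma pvInner_row_other (s : List Char) (k i c : Nat) (hcne : c ≠ i + k) :
    ∀ (L : List Nat) (T0 : List (List Int)),
      pvGet2 (L.foldl (fun T j =>
          if pvComplement.get? (pvCharAt s i) == some (pvCharAt s (i + j)) then
            pvSet2 T i (i + k)
              (pvGet2 T i (i + k) + pvGet2 T (i + 1) (i + j - 1) * pvGet2 T (i + j + 1) (i + k))
          else T) T0) i c = pvGet2 T0 i c := by
  intro L
  induction L with
  | nil => intro T0; rfl
  | cons j L ihL =>
    intro T0
    simp only [List.foldl_cons]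
    split_ifs
    · rw [ihL, pvGet2_set2_ne T0 _ (Or.inr hcne)]
    · rw [ihL]

lemma pvBody_step (s : List Char) (k m : Nat) (T : List (List Int))
    (hk : 3 ≤ k) (hkn : k < s.length) (hm : m < s.length - k)
    (hT : pvInv2 s k m T) : pvInv2 s k (m + 1) (pvBody s k T m) := by
  obtain ⟨hlen, hrows, hcell⟩ := hT
  have hin : m < s.length := by omega
  have hikn : m + k < s.length := by omega
  have hA : (running_count_RNA ((s.drop m).take (k + 1))).getD 'A' 0
      = (((s.drop m).take (k + 1)).count 'A' : Int) := by
    unfold running_count_RNA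
    rw [PySem.Dict.getD_foldl_modify_add_one,
        show (PySem.Dict.ofList [('A', (0 : Int)), ('U', 0), ('C', 0), ('G', 0)]).getD 'A' 0
          = 0 from rfl, zero_add]
  have hU : (running_count_RNA ((s.drop m).take (k + 1))).getD 'U' 0
      = (((s.drop m).take (k + 1)).count 'U' : Int) := by
    unfold running_count_RNA
    rw [PySem.Dict.getD_foldl_modify_add_one,
        show (PySem.Dict.ofList [('A', (0 : Int)), ('U', 0), ('C', 0), ('G', 0)]).getD 'U' 0
          = 0 from rfl, zero_add]
  have hC : (running_count_RNA ((s.drop m).take (k + 1))).getD 'C' 0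
      = (((s.drop m).take (k + 1)).count 'C' : Int) := by
    unfold running_count_RNA
    rw [PySem.Dict.getD_foldl_modify_add_one,
        show (PySem.Dict.ofList [('A', (0 : Int)), ('U', 0), ('C', 0), ('G', 0)]).getD 'C' 0
          = 0 from rfl, zero_add]
  have hG : (running_count_RNA ((s.drop m).take (k + 1))).getD 'G' 0
      = (((s.drop m).take (k + 1)).count 'G' : Int) := by
    unfold running_count_RNA
    rw [PySem.Dict.getD_foldl_modify_add_one,
        show (PySem.Dict.ofList [('A', (0 : Int)), ('U', 0), ('C', 0), ('G', 0)]).getD 'G' 0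
          = 0 from rfl, zero_add]
  simp only [pvBody]
  by_cases hbal : ((s.drop m).take (k + 1)).count 'A' = ((s.drop m).take (k + 1)).count 'U'
      ∧ ((s.drop m).take (k + 1)).count 'C' = ((s.drop m).take (k + 1)).count 'G'
  · -- balanced: the cell (m, m+k) is filled with the recurrence sum
    rw [if_pos (by rw [hA, hU, hC, hG]; simp [hbal.1, hbal.2])]
    obtain ⟨i1, i2, i3, i4⟩ :=
      pvInner_cells s k m s.length (List.range' 1 (k - 1)) T hlen hrows hin hikn
    set R1 := (List.range' 1 (k - 1)).foldl (fun T j =>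
        if pvComplement.get? (pvCharAt s m) == some (pvCharAt s (m + j)) then
          pvSet2 T m (m + k)
            (pvGet2 T m (m + k) + pvGet2 T (m + 1) (m + j - 1) * pvGet2 T (m + j + 1) (m + k))
        else T) T with hR1
    have hold : pvGet2 T m (m + k) = 0 := by
      rw [hcell m (m + k) hin hikn, if_neg (by omega)]
    have hsplit : List.range' (m + 1) k = List.range' (m + 1) (k - 1) ++ [m + k] := by
      obtain ⟨k', rfl⟩ : ∃ k', k = k' + 1 := ⟨k - 1, by omega⟩
      rw [List.range'_concat]
      have h1 : k' + 1 - 1 = k' := by omega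
      have h2 : m + 1 + 1 * k' = m + (k' + 1) := by omega
      rw [h1, h2]
    have hfin : pvC s m (m + k + 1)
        = ((List.range' 1 (k - 1)).map (fun j =>
            if pvComplement.get? (pvCharAt s m) == some (pvCharAt s (m + j)) then
              pvGet2 T (m + 1) (m + j - 1) * pvGet2 T (m + j + 1) (m + k) else 0)).sum
          + (if pvComplement.get? (pvCharAt s m) == some (pvCharAt s (m + k)) then
              pvGet2 T (m + 1) (m + k - 1) else 0) := by
      rw [pvC_unfold s m k]
      rw [if_neg (by simp [hbal.1, hbal.2])]
      rw [pv_foldl_if_sum, zero_add]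
      rw [hsplit, List.map_append, List.sum_append, List.map_cons, List.map_nil,
          List.sum_cons, List.sum_nil, add_zero]
      congr 1
      · -- the j-loop part: reindex p = m + j
        rw [show List.range' (1 : Nat) (k - 1) = (List.range (k - 1)).map (fun t => 1 + t)
              from List.range'_eq_map_range,
            show List.range' (m + 1 : Nat) (k - 1)
              = (List.range (k - 1)).map (fun t => m + 1 + t)
              from List.range'_eq_map_range]
        rw [List.map_map, List.map_map]
        apply congrArg List.sum
        apply List.map_congr_left
        intro t ht
        have htk : t < k - 1 := List.mem_range.mp ht
        simp only [Function.comp]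
        by_cases hmc : pvComplement.get? (pvCharAt s m) = some (pvCharAt s (m + 1 + t))
        · rw [if_pos (beq_iff_eq.mpr hmc.symm),
              if_pos (by rw [show m + (1 + t) = m + 1 + t from by omega]
                         exact beq_iff_eq.mpr hmc)]
          have e1 : pvGet2 T (m + 1) (m + (1 + t) - 1) = pvC s (m + 1) (m + 1 + t) := by
            rw [hcell (m + 1) (m + (1 + t) - 1) (by omega) (by omega), if_pos (by omega),
                show m + (1 + t) - 1 + 1 = m + 1 + t from by omega]
          have e2 : pvGet2 T (m + (1 + t) + 1) (m + k) = pvC s (m + 1 + t + 1) (m + k + 1) := by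
            rw [hcell (m + (1 + t) + 1) (m + k) (by omega) (by omega), if_pos (by omega),
                show m + (1 + t) + 1 = m + 1 + t + 1 from by omega]
          rw [e1, e2]
        · rw [if_neg (by simp only [beq_iff_eq]
                         exact fun hb => hmc hb.symm),
              if_neg (by simp only [beq_iff_eq]
                         rw [show m + (1 + t) = m + 1 + t from by omega]
                         exact hmc)]
      · -- the closing `if` / last p = m + k
        by_cases hmc : pvComplement.get? (pvCharAt s m) = some (pvCharAt s (m + k))
        · have e3 : pvGet2 T (m + 1) (m + k - 1) = pvC s (m + 1) (m + k) := by
            rw [hcell (m + 1) (m + k - 1) (by omega) (by omega), if_pos (by omega),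
                show m + k - 1 + 1 = m + k from by omega]
          rw [if_pos (beq_iff_eq.mpr hmc.symm), if_pos (beq_iff_eq.mpr hmc), e3,
              pvC_nil s (m + k + 1) (m + k + 1) le_rfl, mul_one]
        · rw [if_neg (by simp only [beq_iff_eq]; exact fun hb => hmc hb.symm),
              if_neg (by simp only [beq_iff_eq]; exact hmc)]
    have hR1get : pvGet2 R1 m (m + k)
        = ((List.range' 1 (k - 1)).map (fun j =>
            if pvComplement.get? (pvCharAt s m) == some (pvCharAt s (m + j)) then
              pvGet2 T (m + 1) (m + j - 1) * pvGet2 T (m + j + 1) (m + k) else 0)).sum := by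
      rw [i4, hold, zero_add]
    by_cases hmk : (pvComplement.get? (pvCharAt s m) == some (pvCharAt s (m + k))) = true
    · rw [if_pos hmk]
      refine ⟨by rw [pvSet2_length]; exact i1, pvSet2_rows R1 m (m + k) _ i1 i2 hin, ?_⟩
      intro r c hr hc
      by_cases hrc : r = m ∧ c = m + k
      · rw [hrc.1, hrc.2,
            pvGet2_set2_self R1 (i := m) (j := m + k) _
              (by rw [i1]; omega) (by rw [pvRowLen R1 m i1 i2 hin]; omega),
            if_pos (show (m ≤ m + k + 1 ∧ m + k ≤ m + (k - 1)) ∨ (m + k = m + k ∧ m < m + 1)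
              from Or.inr ⟨rfl, by omega⟩),
            hR1get, i3 (m + 1) (m + k - 1) (by omega), hfin, if_pos hmk]
      · rw [pvGet2_set2_ne R1 _ (show r ≠ m ∨ c ≠ m + k by tauto)]
        have hR1rc : pvGet2 R1 r c = pvGet2 T r c := by
          by_cases hrm : r = m
          · have hcne : c ≠ m + k := fun hcc => hrc ⟨hrm, hcc⟩
            rw [hrm]
            exact pvInner_row_other s k m c hcne (List.range' 1 (k - 1)) T
          · exact i3 r c hrm
        rw [hR1rc, hcell r c hr hc]
        by_cases hc1 : r ≤ c + 1 ∧ c ≤ r + (k - 1)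
        · rw [if_pos (show (r ≤ c + 1 ∧ c ≤ r + (k - 1)) ∨ (c = r + k ∧ r < m)
                from Or.inl hc1),
              if_pos (show (r ≤ c + 1 ∧ c ≤ r + (k - 1)) ∨ (c = r + k ∧ r < m + 1)
                from Or.inl hc1)]
        · by_cases hc2 : c = r + k ∧ r < m
          · rw [if_pos (show (r ≤ c + 1 ∧ c ≤ r + (k - 1)) ∨ (c = r + k ∧ r < m)
                  from Or.inr hc2),
                if_pos (show (r ≤ c + 1 ∧ c ≤ r + (k - 1)) ∨ (c = r + k ∧ r < m + 1)
                  from Or.inr ⟨hc2.1, by omega⟩)]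
          · rw [if_neg (show ¬((r ≤ c + 1 ∧ c ≤ r + (k - 1)) ∨ (c = r + k ∧ r < m)) by omega),
                if_neg (show ¬((r ≤ c + 1 ∧ c ≤ r + (k - 1)) ∨ (c = r + k ∧ r < m + 1))
                  by omega)]
    · rw [if_neg hmk]
      refine ⟨i1, i2, ?_⟩
      intro r c hr hc
      by_cases hrc : r = m ∧ c = m + k
      · rw [hrc.1, hrc.2,
            if_pos (show (m ≤ m + k + 1 ∧ m + k ≤ m + (k - 1)) ∨ (m + k = m + k ∧ m < m + 1)
              from Or.inr ⟨rfl, by omega⟩),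
            hR1get, hfin, if_neg hmk, add_zero]
      · have hR1rc : pvGet2 R1 r c = pvGet2 T r c := by
          by_cases hrm : r = m
          · have hcne : c ≠ m + k := fun hcc => hrc ⟨hrm, hcc⟩
            rw [hrm]
            exact pvInner_row_other s k m c hcne (List.range' 1 (k - 1)) T
          · exact i3 r c hrm
        rw [hR1rc, hcell r c hr hc]
        by_cases hc1 : r ≤ c + 1 ∧ c ≤ r + (k - 1)
        · rw [if_pos (show (r ≤ c + 1 ∧ c ≤ r + (k - 1)) ∨ (c = r + k ∧ r < m)
                from Or.inl hc1),
              if_pos (show (r ≤ c + 1 ∧ c ≤ r + (k - 1)) ∨ (c = r + k ∧ r < m + 1)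
                from Or.inl hc1)]
        · by_cases hc2 : c = r + k ∧ r < m
          · rw [if_pos (show (r ≤ c + 1 ∧ c ≤ r + (k - 1)) ∨ (c = r + k ∧ r < m)
                  from Or.inr hc2),
                if_pos (show (r ≤ c + 1 ∧ c ≤ r + (k - 1)) ∨ (c = r + k ∧ r < m + 1)
                  from Or.inr ⟨hc2.1, by omega⟩)]
          · rw [if_neg (show ¬((r ≤ c + 1 ∧ c ≤ r + (k - 1)) ∨ (c = r + k ∧ r < m)) by omega),
                if_neg (show ¬((r ≤ c + 1 ∧ c ≤ r + (k - 1)) ∨ (c = r + k ∧ r < m + 1))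
                  by omega)]
  · -- unbalanced: nothing is written and B's count of the window is 0 as well
    rw [if_neg ?hcond]
    case hcond =>
      rw [hA, hU, hC, hG]
      simp only [Bool.and_eq_true, beq_iff_eq, Nat.cast_inj]
      tauto
    refine ⟨hlen, hrows, ?_⟩
    intro r c hr hc
    rw [hcell r c hr hc]
    by_cases hc1 : r ≤ c + 1 ∧ c ≤ r + (k - 1)
    · rw [if_pos (show (r ≤ c + 1 ∧ c ≤ r + (k - 1)) ∨ (c = r + k ∧ r < m) from Or.inl hc1),
          if_pos (show (r ≤ c + 1 ∧ c ≤ r + (k - 1)) ∨ (c = r + k ∧ r < m + 1)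
            from Or.inl hc1)]
    · by_cases hc2 : c = r + k ∧ r < m
      · rw [if_pos (show (r ≤ c + 1 ∧ c ≤ r + (k - 1)) ∨ (c = r + k ∧ r < m)
              from Or.inr hc2),
            if_pos (show (r ≤ c + 1 ∧ c ≤ r + (k - 1)) ∨ (c = r + k ∧ r < m + 1)
              from Or.inr ⟨hc2.1, by omega⟩)]
      · by_cases hc3 : c = r + k ∧ r < m + 1
        · rw [if_neg (show ¬((r ≤ c + 1 ∧ c ≤ r + (k - 1)) ∨ (c = r + k ∧ r < m)) by omega),
              if_pos (show (r ≤ c + 1 ∧ c ≤ r + (k - 1)) ∨ (c = r + k ∧ r < m + 1)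
                from Or.inr hc3),
              hc3.1, show r = m from by omega, pvC_unfold s m k,
              if_pos (by simp only [Bool.or_eq_true, bne_iff_ne, ne_eq]; tauto)]
        · rw [if_neg (show ¬((r ≤ c + 1 ∧ c ≤ r + (k - 1)) ∨ (c = r + k ∧ r < m)) by omega),
              if_neg (show ¬((r ≤ c + 1 ∧ c ≤ r + (k - 1)) ∨ (c = r + k ∧ r < m + 1))
                by omega)]

lemma pvLoop2_step (s : List Char) (k : Nat) (T : List (List Int))
    (hk : 3 ≤ k) (hkn : k < s.length) (hT : pvInv s (k - 1) T) :
    pvInv s k ((List.range (s.length - k)).foldl (pvBody s k) T) := by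
  have start : pvInv2 s k 0 T := by
    obtain ⟨h1, h2, h3⟩ := hT
    refine ⟨h1, h2, ?_⟩
    intro i j hi hj
    rw [h3 i j hi hj]
    by_cases c : i ≤ j + 1 ∧ j ≤ i + (k - 1)
    · rw [if_pos c, if_pos (show (i ≤ j + 1 ∧ j ≤ i + (k - 1)) ∨ (j = i + k ∧ i < 0)
            from Or.inl c)]
    · rw [if_neg c,
          if_neg (show ¬((i ≤ j + 1 ∧ j ≤ i + (k - 1)) ∨ (j = i + k ∧ i < 0)) by omega)]
  have main : ∀ m, m ≤ s.length - k →
      pvInv2 s k m ((List.range m).foldl (pvBody s k) T) := by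
    intro m
    induction m with
    | zero => intro _; simpa using start
    | succ m ih =>
      intro h
      rw [List.range_succ, List.foldl_append, List.foldl_cons, List.foldl_nil]
      exact pvBody_step s k m _ hk hkn (by omega) (ih (by omega))
  obtain ⟨h1, h2, h3⟩ := main (s.length - k) le_rfl
  refine ⟨h1, h2, ?_⟩
  intro i j hi hj
  rw [h3 i j hi hj]
  by_cases c : i ≤ j + 1 ∧ j ≤ i + k
  · rw [if_pos c]
    by_cases c1 : i ≤ j + 1 ∧ j ≤ i + (k - 1)
    · rw [if_pos (show (i ≤ j + 1 ∧ j ≤ i + (k - 1)) ∨ (j = i + k ∧ i < s.length - k)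
            from Or.inl c1)]
    · rw [if_pos (show (i ≤ j + 1 ∧ j ≤ i + (k - 1)) ∨ (j = i + k ∧ i < s.length - k)
            from Or.inr ⟨by omega, by omega⟩)]
  · rw [if_neg c,
        if_neg (show ¬((i ≤ j + 1 ∧ j ≤ i + (k - 1)) ∨ (j = i + k ∧ i < s.length - k))
          by omega)]

lemma pvLoop2_inv (s : List Char) :
    pvInv s (2 + (s.length - 3)) (pvLoop2 s (pvLoop1 s)) := by
  unfold pvLoop2
  have main : ∀ t, t ≤ s.length - 3 →
      pvInv s (2 + t) ((List.range' 3 t).foldl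
        (fun T k => (List.range (s.length - k)).foldl (pvBody s k) T) (pvLoop1 s)) := by
    intro t
    induction t with
    | zero => intro _; simpa using pvInv_widen s _ (pvLoop1_inv s)
    | succ t ih =>
      intro ht
      rw [List.range'_concat, List.foldl_append, List.foldl_cons, List.foldl_nil]
      rw [show 3 + 1 * t = 3 + t from by omega]
      have hstep := pvLoop2_step s (3 + t)
          ((List.range' 3 t).foldl
            (fun T k => (List.range (s.length - k)).foldl (pvBody s k) T) (pvLoop1 s))
          (by omega) (by omega)
          (by rw [show 3 + t - 1 = 2 + t from by omega]; exact ih (by omega))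
      rw [show 2 + (t + 1) = 3 + t from by omega]
      exact hstep
  exact main (s.length - 3) le_rfl

-- ===== VERDICT (by name: the statement is the Claim_ definition above) =====
theorem dp_non_crossing_spec : Claim_equal_dp_non_crossing := by
  intro RNA _ hPre
  obtain ⟨hne, -⟩ := hPre
  have hn : 1 ≤ RNA.toList.length := by
    cases h : RNA.toList with
    | nil => exact absurd h hne
    | cons a l => simp
  simp only [Spec_dp_non_crossing, dp_non_crossing, dp_non_crossing_alt]
  set s := RNA.toList with hs
  obtain ⟨h1, h2, h3⟩ := pvLoop2_inv s
  have hlen0 : ((pvLoop2 s (pvLoop1 s)).getD 0 []).length = s.length :=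
    pvRowLen _ 0 h1 h2 (by omega)
  rw [PySem.List.pyGet?_neg_one, List.getLast?_eq_getElem?, hlen0]
  have hgd : (((pvLoop2 s (pvLoop1 s)).getD 0 [])[s.length - 1]?).getD 0
      = pvGet2 (pvLoop2 s (pvLoop1 s)) 0 (s.length - 1) := by
    simp only [pvGet2, List.getD_eq_getElem?_getD]
  rw [hgd, h3 0 (s.length - 1) (by omega) (by omega), if_pos (by omega),
      show s.length - 1 + 1 = s.length from by omega]
  unfold pvC
  rw [Nat.sub_zero]
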